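-- pv_equiv track=rewrite | github.com/alirezarezaei1/cppiler | cppiler.py | corosheh_count
-- ===== SOURCE A (Python) =====
-- def corosheh_count(list):
--     """
--     for checking the {} in code
--     time complexity = O(n*m)    n : len(list)     m : maximum len all elements of list
--     """
--     count = 0
--     for i in list:
--         for j in i:
--             if j == "{":
--                 count = count +1
--             elif j == "}":
--                 count = count -1
--     return count
-- ===== SOURCE B (Python) =====
-- def corosheh_count(list):
--     freq = {}
--     for i in list:
--         for j in i:
--             freq[j] = freq.get(j, 0) + 1
--     return freq.get("{", 0) - freq.get("}", 0)
-- ===== Notes on version B (the rewrite author's own statement) =====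
-- stated objective: alternative
-- what changed: Instead of branch-testing each character against '{' and '}' while maintaining a running signed counter, B accumulates a full character-frequency table in a dict and returns freq['{'] - freq['}'] at the end.
import Mathlib
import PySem

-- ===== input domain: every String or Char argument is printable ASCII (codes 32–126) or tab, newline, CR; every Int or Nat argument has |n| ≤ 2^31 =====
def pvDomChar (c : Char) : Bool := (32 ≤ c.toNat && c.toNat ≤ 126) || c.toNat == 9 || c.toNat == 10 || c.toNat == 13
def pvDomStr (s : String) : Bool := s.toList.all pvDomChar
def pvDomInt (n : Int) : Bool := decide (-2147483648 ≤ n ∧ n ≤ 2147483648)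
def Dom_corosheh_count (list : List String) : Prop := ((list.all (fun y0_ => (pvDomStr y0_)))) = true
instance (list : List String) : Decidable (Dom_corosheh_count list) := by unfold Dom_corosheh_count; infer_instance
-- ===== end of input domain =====

-- B replaces A's per-character branch-and-signed-counter loop by accumulating a
-- character-frequency dict and returning freq['{'] - freq['}'] (alternative, same cost).

-- ===== PORT A =====
def corosheh_count (list : List String) : Int :=
  list.foldl (fun count i =>
    i.toList.foldl (fun count j =>
      if j = '{' then count + 1
      else if j = '}' then count - 1
      else count) count) 0

-- ===== PORT B =====
def corosheh_count_alt (list : List String) : Int :=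
  let freq : PySem.Dict Char Int :=
    list.foldl (fun freq i =>
      i.toList.foldl (fun freq j => freq.modify j 0 (· + 1)) freq) PySem.Dict.empty
  freq.getD '{' 0 - freq.getD '}' 0

-- ===== PRECONDITION & SPEC =====
def Spec_corosheh_count (list : List String) (out : Int) : Prop := out = corosheh_count_alt list
instance (list : List String) (out : Int) : Decidable (Spec_corosheh_count list out) := by unfold Spec_corosheh_count; infer_instance

-- ===== CLAIM (what is proved, stated in full; the proofs are below) =====
def Claim_equal_corosheh_count : Prop := ∀ (list : List String), Dom_corosheh_count list → Spec_corosheh_count list (corosheh_count list)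

-- ===== LEMMAS AND PROOFS =====

-- A's inner character loop computes the signed brace count of the string.
theorem pvA_chars (cs : List Char) (c : Int) :
    cs.foldl (fun count j =>
      if j = '{' then count + 1 else if j = '}' then count - 1 else count) c
    = c + (cs.count '{' : Int) - (cs.count '}' : Int) := by
  induction cs generalizing c with
  | nil => simp
  | cons x xs ih =>
    simp only [List.foldl_cons, ih]
    by_cases h1 : x = '{'
    · simp [h1, List.count_cons]; ring
    · by_cases h2 : x = '}'
      · simp [h1, h2, List.count_cons]; ring
      · simp [h1, h2, List.count_cons, Ne.symm h1]

-- B's outer loop: the frequency of any character in the final dict.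
theorem pvB_getD (list : List String) (d : PySem.Dict Char Int) (v : Char) :
    (list.foldl (fun freq i =>
      i.toList.foldl (fun freq j => freq.modify j 0 (· + 1)) freq) d).getD v 0
    = d.getD v 0 + (list.map (fun i => (i.toList.count v : Int))).sum := by
  induction list generalizing d with
  | nil => simp
  | cons x xs ih =>
    simp only [List.foldl_cons, List.map_cons, List.sum_cons, ih,
      PySem.Dict.getD_foldl_modify_add_one]
    ring

-- A's outer loop in summed form.
theorem pvA_sum (xs : List String) (c : Int) :
    xs.foldl (fun count i => count + (i.toList.count '{' : Int) - (i.toList.count '}' : Int)) c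
    = c + (xs.map (fun i => (i.toList.count '{' : Int))).sum
        - (xs.map (fun i => (i.toList.count '}' : Int))).sum := by
  induction xs generalizing c with
  | nil => simp
  | cons x l ih => simp only [List.foldl_cons, ih, List.map_cons, List.sum_cons]; ring

-- ===== VERDICT (by name: the statement is the Claim_ definition above) =====
theorem corosheh_count_spec : Claim_equal_corosheh_count := by
  intro list _
  unfold Spec_corosheh_count corosheh_count corosheh_count_alt
  simp only [pvB_getD, PySem.Dict.getD_empty, zero_add, pvA_chars, pvA_sum]
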